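-- pv_equiv track=rewrite | github.com/masonc08/algs | contests/leetcode_biweekly/174/1.py | bestTower
-- ===== SOURCE A (Python) =====
-- from typing import List
--
-- def bestTower(towers: List[List[int]], center: List[int], radius: int) -> List[int]:
--     best_tower = None
--     x0, y0 = center
--     for x, y, h in towers:
--         cur_distance = abs(x-x0)+abs(y-y0)
--         if cur_distance > radius:
--             continue
--         if best_tower is None or h > best_tower[2]:
--             best_tower = x, y, h
--         elif h == best_tower[2]:
--             best_tower = min(
--                 [x, y, h],
--                 best_tower,
--                 key=lambda x:(x[0], x[1]),
--             )
--     return best_tower[:2] if best_tower is not None else [-1, -1]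
-- ===== SOURCE B (Python) =====
-- from typing import List
--
-- def bestTower(towers: List[List[int]], center: List[int], radius: int) -> List[int]:
--     x0, y0 = center
--     cands = sorted((-h, x, y) for x, y, h in towers if abs(x - x0) + abs(y - y0) <= radius)
--     if not cands:
--         return [-1, -1]
--     _, x, y = cands[0]
--     return (x, y)
-- ===== Notes on version B (the rewrite author's own statement) =====
-- stated objective: alternative
-- what changed: Instead of a running-best loop with greater/equal tie-break branches, B builds (-h, x, y) key tuples for the in-radius towers, sorts them lexicographically, and reads the answer off the first element of the sorted list.
import Mathlib
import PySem

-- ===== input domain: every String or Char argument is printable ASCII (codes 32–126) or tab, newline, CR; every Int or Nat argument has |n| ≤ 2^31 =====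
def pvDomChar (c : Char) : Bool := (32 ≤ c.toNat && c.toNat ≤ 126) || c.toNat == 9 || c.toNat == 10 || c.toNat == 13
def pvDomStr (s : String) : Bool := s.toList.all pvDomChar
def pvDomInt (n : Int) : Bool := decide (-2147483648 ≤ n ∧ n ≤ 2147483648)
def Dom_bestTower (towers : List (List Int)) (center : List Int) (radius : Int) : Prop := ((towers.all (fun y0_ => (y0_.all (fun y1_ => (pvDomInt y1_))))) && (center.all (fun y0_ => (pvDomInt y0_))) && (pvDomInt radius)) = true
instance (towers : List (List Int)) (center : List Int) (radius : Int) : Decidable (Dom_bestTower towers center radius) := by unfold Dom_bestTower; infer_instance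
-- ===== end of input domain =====

-- B replaces A's running-best loop by a different decomposition: build (-h, x, y) key triples for in-radius towers, sort them lexicographically, and take the head — same result, O(n log n) instead of O(n), return value only (neither mutates).


-- ===== PORT A =====
-- Python tuple-< on pairs, as the key (x[0], x[1]) comparison inside A's min(..).
def pyLt2 (a b : Int × Int) : Bool :=
  if a.1 < b.1 then true
  else if b.1 < a.1 then false
  else decide (a.2 < b.2)

-- the for-loop of A, carrying the best_tower accumulator; list patterns other than
-- [x, y, h] correspond to inputs where Python raises (excluded by Pre_), the loop skips them.
def bestTowerLoop (x0 y0 radius : Int) : Option (Int × Int × Int) → List (List Int) → Option (Int × Int × Int)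
  | best, [] => best
  | best, t :: rest =>
    match t with
    | [x, y, h] =>
      if |x - x0| + |y - y0| > radius then bestTowerLoop x0 y0 radius best rest
      else
        match best with
        | none => bestTowerLoop x0 y0 radius (some (x, y, h)) rest
        | some (bx, by_, bh) =>
          if h > bh then bestTowerLoop x0 y0 radius (some (x, y, h)) rest
          else if h = bh then
            -- min([x,y,h], best_tower, key=(x[0],x[1])): best_tower only if its key is strictly smaller
            bestTowerLoop x0 y0 radius
              (some (if pyLt2 (bx, by_) (x, y) then (bx, by_, bh) else (x, y, h))) rest
          else bestTowerLoop x0 y0 radius best rest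
    | _ => bestTowerLoop x0 y0 radius best rest

def bestTower (towers : List (List Int)) (center : List Int) (radius : Int) : List Int :=
  match center with
  | [x0, y0] =>
    match bestTowerLoop x0 y0 radius none towers with
    | some (x, y, _) => [x, y]
    | none => [-1, -1]
  | _ => [-1, -1]  -- Python raises on unpacking; excluded by Pre_

-- ===== PORT B =====
-- Python compares int 3-tuples lexicographically; this key realises that order on Int × Int × Int.
def keyTriple (t : Int × Int × Int) : Lex (Int × Lex (Int × Int)) := toLex (t.1, toLex (t.2.1, t.2.2))

-- the generator: (-h, x, y) for x, y, h in towers if abs(x-x0)+abs(y-y0) <= radius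
def candsB (x0 y0 radius : Int) (towers : List (List Int)) : List (Int × Int × Int) :=
  towers.filterMap (fun t =>
    match t with
    | [x, y, h] => if |x - x0| + |y - y0| ≤ radius then some (-h, x, y) else none
    | _ => none)

def bestTower_alt (towers : List (List Int)) (center : List Int) (radius : Int) : List Int :=
  match center with
  | [x0, y0] =>
    match PySem.List.sorted (candsB x0 y0 radius towers) keyTriple false with
    | [] => [-1, -1]
    | m :: _ => [m.2.1, m.2.2]   -- _, x, y = cands[0]; return (x, y)
  | _ => [-1, -1]  -- Python raises on unpacking; excluded by Pre_

-- ===== PRECONDITION & SPEC =====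
-- Pre_ excludes exactly the inputs where Python A raises while unpacking: a center that is
-- not a 2-list, or a tower row that is not a 3-list.
def Pre_bestTower (towers : List (List Int)) (center : List Int) (radius : Int) : Prop :=
  center.length = 2 ∧ ∀ t ∈ towers, t.length = 3
instance (towers : List (List Int)) (center : List Int) (radius : Int) : Decidable (Pre_bestTower towers center radius) := by unfold Pre_bestTower; infer_instance
def pvWitness_bestTower : List (List Int) × List Int × Int := ([[1, 2, 5], [0, 0, 5]], [0, 1], 9)

def Spec_bestTower (towers : List (List Int)) (center : List Int) (radius : Int) (out : List Int) : Prop := out = bestTower_alt towers center radius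
instance (towers : List (List Int)) (center : List Int) (radius : Int) (out : List Int) : Decidable (Spec_bestTower towers center radius out) := by unfold Spec_bestTower; infer_instance

-- ===== CLAIM (what is proved, stated in full; the proofs are below) =====
def Claim_equal_bestTower : Prop := ∀ (towers : List (List Int)) (center : List Int) (radius : Int), Dom_bestTower towers center radius → Pre_bestTower towers center radius → Spec_bestTower towers center radius (bestTower towers center radius)

-- ===== LEMMAS AND PROOFS =====

-- proof-side helpers describing A's loop as a fold over the in-radius towers
def pyLt3 (a b : Int × Int × Int) : Bool :=
  if a.1 < b.1 then true
  else if b.1 < a.1 then false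
  else if a.2.1 < b.2.1 then true
  else if b.2.1 < a.2.1 then false
  else decide (a.2.2 < b.2.2)

def keyB (t : Int × Int × Int) : Int × Int × Int := (-t.2.2, t.1, t.2.1)

def stepB (b t : Int × Int × Int) : Int × Int × Int :=
  if pyLt3 (keyB t) (keyB b) then t else b

def candsOf (x0 y0 radius : Int) (towers : List (List Int)) : List (Int × Int × Int) :=
  towers.filterMap (fun t =>
    match t with
    | [x, y, h] => if |x - x0| + |y - y0| ≤ radius then some (x, y, h) else none
    | _ => none)

theorem pyLt2_iff (a b : Int × Int) :
    pyLt2 a b = true ↔ (a.1 < b.1 ∨ (a.1 = b.1 ∧ a.2 < b.2)) := by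
  unfold pyLt2; split_ifs <;> simp <;> omega

theorem pyLt3_iff (a b : Int × Int × Int) :
    pyLt3 a b = true ↔
      (a.1 < b.1 ∨ (a.1 = b.1 ∧ (a.2.1 < b.2.1 ∨ (a.2.1 = b.2.1 ∧ a.2.2 < b.2.2)))) := by
  unfold pyLt3; split_ifs <;> simp <;> omega

theorem keyTriple_lt_iff (a b : Int × Int × Int) :
    keyTriple a < keyTriple b ↔ pyLt3 a b = true := by
  simp [keyTriple, Prod.Lex.toLex_lt_toLex, pyLt3_iff]

theorem keyTriple_inj (a b : Int × Int × Int) (h : keyTriple a = keyTriple b) : a = b := by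
  simp only [keyTriple, toLex_inj, Prod.mk.injEq] at h
  obtain ⟨h1, h2, h3⟩ := h
  exact Prod.ext h1 (Prod.ext h2 h3)

-- A's three-branch update of the accumulator equals the min step stepB.
theorem stepA_eq_stepB (bx by_ bh x y h : Int) :
    (if h > bh then (x, y, h)
     else if h = bh then (if pyLt2 (bx, by_) (x, y) then (bx, by_, bh) else (x, y, h))
     else (bx, by_, bh)) = stepB (bx, by_, bh) (x, y, h) := by
  simp only [stepB, keyB, pyLt3_iff, pyLt2_iff]
  split_ifs <;> simp only [Prod.mk.injEq] <;> omega

theorem candsOf_skip (x0 y0 radius x y h : Int) (rest : List (List Int))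
    (hr : |x - x0| + |y - y0| > radius) :
    candsOf x0 y0 radius ([x, y, h] :: rest) = candsOf x0 y0 radius rest := by
  simp [candsOf, show ¬ |x - x0| + |y - y0| ≤ radius from by omega]

theorem candsOf_keep (x0 y0 radius x y h : Int) (rest : List (List Int))
    (hr : ¬ |x - x0| + |y - y0| > radius) :
    candsOf x0 y0 radius ([x, y, h] :: rest) = (x, y, h) :: candsOf x0 y0 radius rest := by
  simp [candsOf, show |x - x0| + |y - y0| ≤ radius from by omega]

theorem loop_some (x0 y0 radius : Int) (ts : List (List Int)) :
    ∀ b, bestTowerLoop x0 y0 radius (some b) ts = some ((candsOf x0 y0 radius ts).foldl stepB b) := by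
  induction ts with
  | nil => intro b; simp [bestTowerLoop, candsOf]
  | cons t rest ih =>
    intro b
    obtain ⟨bx, by_, bh⟩ := b
    rcases t with _ | ⟨x, _ | ⟨y, _ | ⟨h, _ | ⟨w, t'⟩⟩⟩⟩ <;>
      simp only [bestTowerLoop] <;>
      try (rw [show candsOf x0 y0 radius _ = candsOf x0 y0 radius rest from by simp [candsOf, List.filterMap_cons]]; exact ih _)
    by_cases hr : |x - x0| + |y - y0| > radius
    · rw [if_pos hr, candsOf_skip x0 y0 radius x y h rest hr]
      exact ih _
    · rw [if_neg hr, candsOf_keep x0 y0 radius x y h rest hr, List.foldl_cons,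
        ← stepA_eq_stepB bx by_ bh x y h]
      split_ifs <;> exact ih _

theorem loop_none (x0 y0 radius : Int) (ts : List (List Int)) :
    bestTowerLoop x0 y0 radius none ts =
      match candsOf x0 y0 radius ts with
      | [] => none
      | c :: cs => some (cs.foldl stepB c) := by
  induction ts with
  | nil => simp [bestTowerLoop, candsOf]
  | cons t rest ih =>
    rcases t with _ | ⟨x, _ | ⟨y, _ | ⟨h, _ | ⟨w, t'⟩⟩⟩⟩ <;>
      simp only [bestTowerLoop] <;>
      try (rw [show candsOf x0 y0 radius _ = candsOf x0 y0 radius rest from by simp [candsOf, List.filterMap_cons]]; exact ih)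
    by_cases hr : |x - x0| + |y - y0| > radius
    · rw [if_pos hr, candsOf_skip x0 y0 radius x y h rest hr]
      exact ih
    · rw [if_neg hr, candsOf_keep x0 y0 radius x y h rest hr]
      exact loop_some x0 y0 radius rest (x, y, h)

-- B's candidate list is A's candidate list pushed through the key map.
theorem candsB_eq_map (x0 y0 radius : Int) (ts : List (List Int)) :
    candsB x0 y0 radius ts = (candsOf x0 y0 radius ts).map keyB := by
  induction ts with
  | nil => rfl
  | cons t rest ih =>
    rcases t with _ | ⟨x, _ | ⟨y, _ | ⟨h, _ | ⟨w, t'⟩⟩⟩⟩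
    · simpa [candsB, candsOf, List.filterMap_cons] using ih
    · simpa [candsB, candsOf, List.filterMap_cons] using ih
    · simpa [candsB, candsOf, List.filterMap_cons] using ih
    · by_cases hr : |x - x0| + |y - y0| ≤ radius <;>
        simp [candsB, candsOf, List.filterMap_cons, hr, keyB] <;> exact ih
    · simpa [candsB, candsOf, List.filterMap_cons] using ih

theorem foldl_stepB_mem (cs : List (Int × Int × Int)) :
    ∀ c, cs.foldl stepB c ∈ c :: cs := by
  induction cs with
  | nil => intro c; simp
  | cons t rest ih =>
    intro c
    simp only [List.foldl_cons]
    rcases List.mem_cons.1 (ih (stepB c t)) with h | h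
    · rw [h]; unfold stepB; split_ifs <;> simp
    · simp [h]

theorem stepB_le_both (c t : Int × Int × Int) :
    keyTriple (keyB (stepB c t)) ≤ keyTriple (keyB c) ∧
    keyTriple (keyB (stepB c t)) ≤ keyTriple (keyB t) := by
  unfold stepB
  split_ifs with hlt
  · exact ⟨le_of_lt ((keyTriple_lt_iff _ _).2 hlt), le_refl _⟩
  · refine ⟨le_refl _, ?_⟩
    have hnot : ¬ keyTriple (keyB t) < keyTriple (keyB c) := by
      rw [keyTriple_lt_iff]; simp [hlt]
    exact le_of_not_gt hnot

theorem foldl_stepB_min (cs : List (Int × Int × Int)) :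
    ∀ c, ∀ y ∈ c :: cs, keyTriple (keyB (cs.foldl stepB c)) ≤ keyTriple (keyB y) := by
  induction cs with
  | nil =>
    intro c y hy
    simp at hy; subst hy; exact le_refl _
  | cons t rest ih =>
    intro c y hy
    simp only [List.foldl_cons]
    have hbase := ih (stepB c t) _ List.mem_cons_self
    rcases List.mem_cons.1 hy with rfl | hy
    · exact le_trans hbase (stepB_le_both y t).1
    rcases List.mem_cons.1 hy with rfl | hy
    · exact le_trans hbase (stepB_le_both c y).2
    · exact ih (stepB c t) y (List.mem_cons_of_mem _ hy)

-- ===== VERDICT (by name: the statement is the Claim_ definition above) =====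
theorem bestTower_spec : Claim_equal_bestTower := by
  intro towers center radius _ _
  unfold Spec_bestTower
  rcases center with _ | ⟨x0, _ | ⟨y0, _ | ⟨z, c'⟩⟩⟩ <;> try rfl
  simp only [bestTower, bestTower_alt, loop_none, candsB_eq_map]
  cases hc : candsOf x0 y0 radius towers with
  | nil => simp [PySem.List.sorted]
  | cons c cs =>
    have hne : (candsOf x0 y0 radius towers).map keyB ≠ [] := by simp [hc]
    cases hs : PySem.List.sorted ((candsOf x0 y0 radius towers).map keyB) keyTriple false with
    | nil => exact absurd ((PySem.List.sorted_eq_nil_iff _ _ _).1 hs) hne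
    | cons m tl =>
      -- m is the unique keyTriple-minimum, and so is keyB of A's fold result
      have hmem0 : m ∈ PySem.List.sorted ((candsOf x0 y0 radius towers).map keyB) keyTriple false := by
        rw [hs]; exact List.mem_cons_self
      have hmmem : m ∈ (candsOf x0 y0 radius towers).map keyB := by
        simpa [PySem.List.mem_sorted] using hmem0
      have hmmin : ∀ y ∈ (candsOf x0 y0 radius towers).map keyB, keyTriple m ≤ keyTriple y :=
        PySem.List.key_head_sorted_le _ keyTriple hs
      set M := cs.foldl stepB c with hM
      have hMmem : keyB M ∈ (candsOf x0 y0 radius towers).map keyB := by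
        rw [hc]; exact List.mem_map_of_mem (foldl_stepB_mem cs c)
      have hMmin : ∀ y ∈ (candsOf x0 y0 radius towers).map keyB, keyTriple (keyB M) ≤ keyTriple y := by
        intro y hy
        rw [hc] at hy
        obtain ⟨z, hz, rfl⟩ := List.mem_map.1 hy
        exact foldl_stepB_min cs c z hz
      have heq : m = keyB M :=
        keyTriple_inj _ _ (le_antisymm (hmmin _ hMmem) (hMmin _ hmmem))
      rw [hc] at hs
      rw [hs, heq]
      simp [keyB, ← hM]
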